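-- pv_equiv track=rewrite | github.com/davidatjfs-cyber/financial-expert-new | core/backtest.py | _get_month_end_dates
-- ===== SOURCE A (Python) =====
-- def _get_month_end_dates(all_dates: list[str]) -> list[str]:
--     month_ends = []
--     for i in range(len(all_dates) - 1):
--         d1 = all_dates[i][:7]
--         d2 = all_dates[i + 1][:7]
--         if d1 != d2:
--             month_ends.append(all_dates[i])
--     if all_dates:
--         month_ends.append(all_dates[-1])
--     return month_ends
-- ===== SOURCE B (Python) =====
-- def _get_month_end_dates(all_dates: list[str]) -> list[str]:
--     # Scan the list as consecutive runs of equal month prefixes and emit each run's last element.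
--     out = []
--     i, n = 0, len(all_dates)
--     while i < n:
--         key = all_dates[i][:7]
--         j = i
--         while j + 1 < n and all_dates[j + 1][:7] == key:
--             j += 1
--         out.append(all_dates[j])
--         i = j + 1
--     return out
-- ===== Notes on version B (the rewrite author's own statement) =====
-- stated objective: alternative
-- what changed: B replaces A's pass of adjacent-prefix comparisons plus a separate unconditional final append with a two-level run scanner: an inner loop consumes each maximal run of dates sharing a month prefix and the outer loop appends that run's last element.
import Mathlib
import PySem

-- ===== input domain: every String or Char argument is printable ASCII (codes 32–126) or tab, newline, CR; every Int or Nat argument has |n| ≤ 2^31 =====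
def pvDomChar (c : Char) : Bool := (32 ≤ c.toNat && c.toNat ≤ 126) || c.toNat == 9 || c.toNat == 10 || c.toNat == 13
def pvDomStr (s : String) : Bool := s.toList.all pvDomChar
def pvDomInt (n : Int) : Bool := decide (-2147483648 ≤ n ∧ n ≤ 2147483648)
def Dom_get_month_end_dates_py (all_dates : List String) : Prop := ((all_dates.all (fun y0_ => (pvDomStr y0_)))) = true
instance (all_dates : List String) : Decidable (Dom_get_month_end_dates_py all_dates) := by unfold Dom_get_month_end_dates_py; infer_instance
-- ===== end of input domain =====

-- B replaces A's adjacent-prefix comparison pass (plus separate final append) with a run scanner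
-- that consumes each run of equal month prefixes and emits the run's last element (objective: alternative).

-- d[:7], the month prefix, used by both Pythons
def pvKey (s : String) : String := PySem.Str.slice s none (some 7)

-- ===== PORT A =====
def get_month_end_dates_py (all_dates : List String) : List String :=
  let month_ends : List String := []
  let month_ends := (PySem.List.pyRange 0 ((all_dates.length : Int) - 1) 1).foldl
    (fun acc i =>
      let d1 := pvKey (PySem.List.pyGetD all_dates i "")
      let d2 := pvKey (PySem.List.pyGetD all_dates (i + 1) "")
      if d1 ≠ d2 then acc ++ [PySem.List.pyGetD all_dates i ""] else acc) month_ends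
  if all_dates ≠ [] then month_ends ++ [PySem.List.pyGetD all_dates (-1) ""] else month_ends

-- ===== PORT B =====
-- inner while loop: advance j while the next date has the same month prefix; returns (all_dates[j], remainder)
def pvRunLast (key : String) (cur : String) : List String → String × List String
  | [] => (cur, [])
  | d :: rest => if pvKey d = key then pvRunLast key d rest else (cur, d :: rest)

theorem pvRunLast_len (key cur : String) (xs : List String) :
    (pvRunLast key cur xs).2.length ≤ xs.length := by
  induction xs generalizing cur with
  | nil => simp [pvRunLast]
  | cons d rest ih =>
    simp only [pvRunLast]
    split
    · exact Nat.le_trans (ih d) (Nat.le_succ _)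
    · exact Nat.le_refl _

def get_month_end_dates_py_alt : List String → List String
  | [] => []
  | d :: rest =>
    let p := pvRunLast (pvKey d) d rest
    p.1 :: get_month_end_dates_py_alt p.2
termination_by xs => xs.length
decreasing_by
  simpa using Nat.lt_succ_of_le (pvRunLast_len (pvKey d) d rest)

-- ===== PRECONDITION & SPEC =====
def Spec_get_month_end_dates_py (all_dates : List String) (out : List String) : Prop := out = get_month_end_dates_py_alt all_dates
instance (all_dates : List String) (out : List String) : Decidable (Spec_get_month_end_dates_py all_dates out) := by unfold Spec_get_month_end_dates_py; infer_instance

-- ===== CLAIM (what is proved, stated in full; the proofs are below) =====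
def Claim_equal_get_month_end_dates_py : Prop := ∀ (all_dates : List String), Dom_get_month_end_dates_py all_dates → Spec_get_month_end_dates_py all_dates (get_month_end_dates_py all_dates)

-- ===== LEMMAS AND PROOFS =====

-- reference form: A's loop output (boundaries, last element not yet appended)
def pairsInit : List String → List String
  | [] => []
  | [_] => []
  | x :: y :: r => if pvKey x ≠ pvKey y then x :: pairsInit (y :: r) else pairsInit (y :: r)

-- reference form: boundaries plus the final element
def pairsRec : List String → List String
  | [] => []
  | [x] => [x]
  | x :: y :: r => if pvKey x ≠ pvKey y then x :: pairsRec (y :: r) else pairsRec (y :: r)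

theorem loopNat (xs : List String) : ∀ acc : List String,
    (List.range (xs.length - 1)).foldl
      (fun acc k => if pvKey (xs.getD k "") ≠ pvKey (xs.getD (k+1) "") then acc ++ [xs.getD k ""] else acc) acc
    = acc ++ pairsInit xs := by
  induction xs with
  | nil => simp [pairsInit]
  | cons x t ih =>
    cases t with
    | nil => simp [pairsInit]
    | cons y r =>
      intro acc
      have hlen : (x :: y :: r).length - 1 = r.length + 1 := by simp
      rw [hlen, List.range_succ_eq_map]
      simp only [List.foldl_cons, List.foldl_map, List.getD_cons_zero, List.getD_cons_succ]
      have ih' := ih (acc := if pvKey x ≠ pvKey y then acc ++ [x] else acc)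
      simp only [List.length_cons, Nat.add_sub_cancel, List.getD_cons_succ] at ih'
      rw [ih']
      by_cases h : pvKey x ≠ pvKey y <;> simp [pairsInit, h]

theorem pairsRec_eq (xs : List String) (h : xs ≠ []) :
    pairsInit xs ++ [xs.getLast h] = pairsRec xs := by
  induction xs with
  | nil => exact absurd rfl h
  | cons x t ih =>
    cases t with
    | nil => simp [pairsInit, pairsRec]
    | cons y r =>
      have ih' := ih (by simp)
      by_cases hk : pvKey x ≠ pvKey y <;>
        simp [pairsInit, pairsRec, hk, List.getLast_cons, ← ih']

theorem runLast_pairs : ∀ (rest : List String) (cur key : String), pvKey cur = key →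
    (pvRunLast key cur rest).1 :: pairsRec (pvRunLast key cur rest).2 = pairsRec (cur :: rest) := by
  intro rest
  induction rest with
  | nil => intro cur key _; simp [pvRunLast, pairsRec]
  | cons d r ih =>
    intro cur key hk
    by_cases hd : pvKey d = key
    · have hne : ¬ pvKey cur ≠ pvKey d := by simp [hk, hd]
      simp only [pvRunLast, if_pos hd, pairsRec, if_neg hne]
      exact ih d key hd
    · have hne : pvKey cur ≠ pvKey d := by rw [hk]; exact fun e => hd e.symm
      simp [pvRunLast, hd, pairsRec, hne]

theorem alt_eq_pairsRec_aux : ∀ (n : Nat) (xs : List String), xs.length ≤ n →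
    get_month_end_dates_py_alt xs = pairsRec xs := by
  intro n
  induction n with
  | zero =>
    intro xs h
    have hx : xs = [] := List.eq_nil_of_length_eq_zero (Nat.le_zero.mp h)
    subst hx
    simp [get_month_end_dates_py_alt, pairsRec]
  | succ n ih =>
    intro xs h
    cases xs with
    | nil => simp [get_month_end_dates_py_alt, pairsRec]
    | cons d rest =>
      rw [get_month_end_dates_py_alt]
      show (pvRunLast (pvKey d) d rest).1
            :: get_month_end_dates_py_alt (pvRunLast (pvKey d) d rest).2 = pairsRec (d :: rest)
      have hr : (pvRunLast (pvKey d) d rest).2.length ≤ n :=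
        Nat.le_trans (pvRunLast_len (pvKey d) d rest) (by simp at h; omega)
      rw [ih _ hr]
      exact runLast_pairs rest d (pvKey d) rfl

theorem alt_eq_pairsRec (xs : List String) : get_month_end_dates_py_alt xs = pairsRec xs :=
  alt_eq_pairsRec_aux xs.length xs (Nat.le_refl _)

theorem a_eq_pairsRec (xs : List String) : get_month_end_dates_py xs = pairsRec xs := by
  cases xs with
  | nil => simp [get_month_end_dates_py, pairsRec, PySem.List.pyRange_one_eq_nil]
  | cons x t =>
    have hne : (x :: t) ≠ [] := by simp
    unfold get_month_end_dates_py
    rw [PySem.List.pyRange_one]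
    simp only [Int.sub_zero, Int.zero_add]
    have ht : (((x :: t).length : Int) - 1).toNat = (x :: t).length - 1 := by
      simp only [List.length_cons]; omega
    rw [ht, List.foldl_map]
    have hfun : (fun (acc : List String) (k : Nat) =>
        if pvKey (PySem.List.pyGetD (x :: t) (k : Int) "") ≠ pvKey (PySem.List.pyGetD (x :: t) ((k : Int) + 1) "")
        then acc ++ [PySem.List.pyGetD (x :: t) (k : Int) ""] else acc)
        = (fun acc k =>
        if pvKey ((x :: t).getD k "") ≠ pvKey ((x :: t).getD (k+1) "") then acc ++ [(x :: t).getD k ""] else acc) := by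
      funext acc k
      have h1 : PySem.List.pyGetD (x :: t) (k : Int) "" = (x :: t).getD k "" :=
        PySem.List.pyGetD_natCast (x :: t) k ""
      have h2 : PySem.List.pyGetD (x :: t) ((k : Int) + 1) "" = (x :: t).getD (k+1) "" := by
        have hc : (k : Int) + 1 = ((k + 1 : Nat) : Int) := by push_cast; ring
        rw [hc, PySem.List.pyGetD_natCast]
      rw [h1, h2]
    rw [hfun]
    rw [loopNat (x :: t) [], List.nil_append, if_pos hne, PySem.List.pyGetD_neg_one (x :: t) "" hne]
    exact pairsRec_eq (x :: t) hne

-- ===== VERDICT (by name: the statement is the Claim_ definition above) =====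
theorem get_month_end_dates_py_spec : Claim_equal_get_month_end_dates_py := by
  intro xs _
  unfold Spec_get_month_end_dates_py
  rw [a_eq_pairsRec, alt_eq_pairsRec]
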